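-- pv_equiv track=rewrite | github.com/shreyasravi320/Allegro | main.py | get_animation_params
-- ===== SOURCE A (Python) =====
-- def get_animation_params(map):
--     params = {}
--     subj = ''
--     obj = ''
--     desc1 = []
--     desc2 = []
--
--     dict1 = {}
--     dict2 = {}
--
--     dict1_keys = []
--     dict2_keys = []
--
--     for key, value in map.items():
--         if value == 'IN':
--             break
--         dict1_keys.append(key)
--         # dict1[key] = map.pop(key)
--
--     for key in dict1_keys:
--         dict1[key] = map.pop(key)
--
--     for key, value in map.items():
--         dict2[key] = map[key]
--
--     if dict1:
--         for key, value in dict1.items():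
--             if value == 'NN':
--                 subj = key
--             else:
--                 desc1.append(key)
--         params[subj] = desc1
--
--
--     if dict2:
--         for key, value in dict2.items():
--             if value == 'NN':
--                 obj = key
--             else:
--                 desc2.append(key)
--         params[obj] = desc2
--
--     return params
-- ===== SOURCE B (Python) =====
-- def get_animation_params(map):
--     # One pass over the items with a flag that flips at the first 'IN';
--     # performs the same deletion of before-'IN' keys from map as the original.
--     params = {}
--     subj = ''
--     obj = ''
--     desc1 = []
--     desc2 = []
--     before = True
--     seen_before = False
--     seen_after = False
--     to_delete = []
--     for key, value in list(map.items()):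
--         if before and value == 'IN':
--             before = False
--         if before:
--             seen_before = True
--             to_delete.append(key)
--             if value == 'NN':
--                 subj = key
--             else:
--                 desc1.append(key)
--         else:
--             seen_after = True
--             if value == 'NN':
--                 obj = key
--             else:
--                 desc2.append(key)
--     if seen_before:
--         params[subj] = desc1
--     if seen_after:
--         params[obj] = desc2
--     for key in to_delete:
--         del map[key]
--     return params
-- ===== Notes on version B (the rewrite author's own statement) =====
-- stated objective: simpler
-- what changed: Replaces the three sequential passes with their intermediate dict1/dict2/dict1_keys structures by a single pass over the items with a boolean flag that flips at the first 'IN', classifying each key directly and deleting the before-'IN' keys at the end; map is mutated identically.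
import Mathlib
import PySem

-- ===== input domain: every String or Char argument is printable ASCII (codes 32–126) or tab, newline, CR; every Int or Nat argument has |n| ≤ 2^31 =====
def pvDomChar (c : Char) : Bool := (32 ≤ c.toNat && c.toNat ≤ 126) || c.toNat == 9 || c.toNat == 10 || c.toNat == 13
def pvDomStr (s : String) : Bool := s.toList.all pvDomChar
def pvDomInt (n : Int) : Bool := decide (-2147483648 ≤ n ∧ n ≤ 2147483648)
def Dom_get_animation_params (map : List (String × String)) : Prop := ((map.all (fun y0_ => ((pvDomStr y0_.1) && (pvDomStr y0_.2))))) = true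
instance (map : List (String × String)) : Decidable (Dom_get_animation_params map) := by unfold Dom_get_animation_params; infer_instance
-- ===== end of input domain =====

-- B replaces A's three passes (collect keys before 'IN', pop them into dict1, copy the rest
-- into dict2, then classify each dict) by a single pass with a flag that flips at the first
-- 'IN' — objective: simpler. Both Pythons mutate `map` identically (delete the before-'IN'
-- keys); the Lean ports and the claim are about the RETURN value only.

-- ===== PORT A =====
-- first loop: keys until the first value == 'IN' (break)
def paKeys : List (String × String) → List String
  | [] => []
  | (k, v) :: rest => if v == "IN" then [] else k :: paKeys rest

-- second loop: for key in dict1_keys: dict1[key] = map.pop(key)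
def paPop : List String → PySem.Dict String String → PySem.Dict String String →
    PySem.Dict String String × PySem.Dict String String
  | [], d1, m => (d1, m)
  | k :: ks, d1, m =>
    match m.pop? k with
    | some (v, m') => paPop ks (d1.insert k v) m'
    | none => paPop ks d1 m  -- unreachable (Python KeyError): every key was read from m

-- third loop: for key, value in map.items(): dict2[key] = map[key]
def paCopy (m : PySem.Dict String String) : PySem.Dict String String :=
  m.items.foldl (fun d2 kv =>
    match m.get? kv.1 with
    | some v => d2.insert kv.1 v
    | none => d2  -- unreachable: kv.1 is a key of m
    ) PySem.Dict.empty

-- classification loop body shared by the dict1 and dict2 passes of A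
def paClassify : List (String × String) → String → List String → String × List String
  | [], subj, desc => (subj, desc)
  | (k, v) :: rest, subj, desc =>
    if v == "NN" then paClassify rest k desc else paClassify rest subj (desc ++ [k])

def get_animation_params (map : List (String × String)) : List (String × List String) :=
  let dict1_keys := paKeys map
  let r := paPop dict1_keys PySem.Dict.empty (PySem.Dict.mk map)
  let dict1 := r.1
  let dict2 := paCopy r.2
  let params : PySem.Dict String (List String) := PySem.Dict.empty
  let params :=
    if dict1.items.isEmpty then params
    else
      let c := paClassify dict1.items "" []
      params.insert c.1 c.2
  let params :=
    if dict2.items.isEmpty then params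
    else
      let c := paClassify dict2.items "" []
      params.insert c.1 c.2
  params.items

-- ===== PORT B =====
-- single pass: flag `before` flips at the first value == 'IN'; classify each key directly
-- (the deletion of the before-'IN' keys from map does not affect the return value)
def pbLoop : List (String × String) → Bool → Bool → Bool → String → String →
    List String → List String → Bool × Bool × String × String × List String × List String
  | [], _, sB, sA, subj, obj, d1, d2 => (sB, sA, subj, obj, d1, d2)
  | (k, v) :: rest, before, sB, sA, subj, obj, d1, d2 =>
    let before := before && !(v == "IN")
    if before then
      pbLoop rest before true sA (if v == "NN" then k else subj) obj
        (if v == "NN" then d1 else d1 ++ [k]) d2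
    else
      pbLoop rest before sB true subj (if v == "NN" then k else obj)
        d1 (if v == "NN" then d2 else d2 ++ [k])

def get_animation_params_alt (map : List (String × String)) : List (String × List String) :=
  let st := pbLoop map true false false "" "" [] []
  let params : PySem.Dict String (List String) := PySem.Dict.empty
  let params := if st.1 then params.insert st.2.2.1 st.2.2.2.2.1 else params
  let params := if st.2.1 then params.insert st.2.2.2.1 st.2.2.2.2.2 else params
  params.items

-- ===== PRECONDITION & SPEC =====
-- Pre_ requires distinct keys: the argument is a Python dict, and an association list with
-- duplicate keys does not encode any dict, so A's behaviour on such lists is not defined.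
def Pre_get_animation_params (map : List (String × String)) : Prop :=
  (map.map Prod.fst).Nodup
instance (map : List (String × String)) : Decidable (Pre_get_animation_params map) := by
  unfold Pre_get_animation_params; infer_instance

def pvWitness_get_animation_params : (List (String × String)) :=
  [("cat", "NN"), ("big", "JJ"), ("on", "IN"), ("mat", "NN")]

def Spec_get_animation_params (map : List (String × String)) (out : List (String × List String)) : Prop := out = get_animation_params_alt map
instance (map : List (String × String)) (out : List (String × List String)) : Decidable (Spec_get_animation_params map out) := by unfold Spec_get_animation_params; infer_instance

-- ===== CLAIM (what is proved, stated in full; the proofs are below) =====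
def Claim_equal_get_animation_params : Prop := ∀ (map : List (String × String)), Dom_get_animation_params map → Pre_get_animation_params map → Spec_get_animation_params map (get_animation_params map)

-- ===== LEMMAS AND PROOFS =====


-- proof-only helper: split the list at the first value == "IN"
def pvSplit : List (String × String) → List (String × String) × List (String × String)
  | [] => ([], [])
  | (k, v) :: rest =>
    if v == "IN" then ([], (k, v) :: rest)
    else
      let r := pvSplit rest
      ((k, v) :: r.1, r.2)

theorem pvSplit_append (l : List (String × String)) : (pvSplit l).1 ++ (pvSplit l).2 = l := by
  induction l with
  | nil => simp [pvSplit]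
  | cons kv rest ih =>
    obtain ⟨k, v⟩ := kv
    by_cases hv : v == "IN" <;> simp [pvSplit, hv, ih]

theorem paKeys_eq (l : List (String × String)) : paKeys l = (pvSplit l).1.map Prod.fst := by
  induction l with
  | nil => simp [pvSplit, paKeys]
  | cons kv rest ih =>
    obtain ⟨k, v⟩ := kv
    by_cases hv : v == "IN" <;> simp [pvSplit, paKeys, hv, ih]

theorem paPop_eq (p s : List (String × String)) (d1 : PySem.Dict String String)
    (h : ((p ++ s).map Prod.fst).Nodup) :
    paPop (p.map Prod.fst) d1 (PySem.Dict.mk (p ++ s)) =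
      (p.foldl (fun d kv => d.insert kv.1 kv.2) d1, PySem.Dict.mk s) := by
  induction p generalizing d1 with
  | nil => simp [paPop]
  | cons kv p' ih =>
    obtain ⟨k, v⟩ := kv
    have h2 : (k :: (p' ++ s).map Prod.fst).Nodup := by
      simpa only [List.cons_append, List.map_cons] using h
    have hk : k ∉ (p' ++ s).map Prod.fst := (List.nodup_cons.mp h2).1
    have hfil : (p' ++ s).filter (fun q => !(q.1 == k)) = p' ++ s := by
      rw [List.filter_eq_self]
      intro a ha
      simp only [Bool.not_eq_eq_eq_not, Bool.not_true, beq_eq_false_iff_ne, ne_eq]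
      intro hak
      exact hk (by simpa [← hak] using List.mem_map_of_mem (f := Prod.fst) ha)
    have hpop : (PySem.Dict.mk ((k, v) :: (p' ++ s))).pop? k =
        some (v, PySem.Dict.mk (p' ++ s)) := by
      simp [PySem.Dict.pop?, PySem.Dict.get?, PySem.Dict.erase, List.filter, hfil]
    simp only [List.map_cons, List.cons_append, paPop, hpop]
    rw [ih (d1.insert k v) ((List.nodup_cons.mp h2).2)]
    simp

theorem pa_items (p : List (String × String)) (h : (p.map Prod.fst).Nodup) :
    (p.foldl (fun d kv => d.insert kv.1 kv.2) (PySem.Dict.empty : PySem.Dict String String)).items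
      = p := by
  have := PySem.Dict.items_foldl_insert_fresh (l := p) (k := Prod.fst) (v := Prod.snd)
    (d := PySem.Dict.empty) (by intro a _; exact PySem.Dict.contains_empty _) h
  simpa using this

theorem paCopy_items (s : List (String × String)) (h : (s.map Prod.fst).Nodup) :
    (paCopy (PySem.Dict.mk s)).items = s := by
  unfold paCopy
  have hitems : (PySem.Dict.mk s).items = s := rfl
  rw [hitems]
  have hcongr := PySem.List.foldl_congr_mem s
    (fun d2 kv => match (PySem.Dict.mk s).get? kv.1 with | some v => d2.insert kv.1 v | none => d2)
    (fun d2 (kv : String × String) => d2.insert kv.1 kv.2)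
    (PySem.Dict.empty : PySem.Dict String String)
    (by
      intro acc kv hmem
      have hget : (PySem.Dict.mk s).get? kv.1 = some kv.2 :=
        PySem.Dict.get?_of_mem_items (PySem.Dict.mk s)
          (by simpa [hitems] using hmem)
          (by simpa [PySem.Dict.keys, hitems] using h)
      simp [hget])
  rw [hcongr]
  have := PySem.Dict.items_foldl_insert_fresh (l := s) (k := Prod.fst) (v := Prod.snd)
    (d := PySem.Dict.empty) (by intro a _; exact PySem.Dict.contains_empty _) h
  simpa using this

theorem pbLoop_after (l : List (String × String)) (sB sA : Bool) (subj obj : String)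
    (d1 d2 : List String) :
    pbLoop l false sB sA subj obj d1 d2 =
      (sB, sA || !l.isEmpty, subj, (paClassify l obj d2).1, d1, (paClassify l obj d2).2) := by
  induction l generalizing sA obj d2 with
  | nil => simp [pbLoop, paClassify]
  | cons kv rest ih =>
    obtain ⟨k, v⟩ := kv
    by_cases hv : v == "NN" <;> simp [pbLoop, paClassify, hv, ih]

theorem pbLoop_before (l : List (String × String)) (sB sA : Bool) (subj obj : String)
    (d1 d2 : List String) :
    pbLoop l true sB sA subj obj d1 d2 =
      (sB || !(pvSplit l).1.isEmpty, sA || !(pvSplit l).2.isEmpty,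
       (paClassify (pvSplit l).1 subj d1).1, (paClassify (pvSplit l).2 obj d2).1,
       (paClassify (pvSplit l).1 subj d1).2, (paClassify (pvSplit l).2 obj d2).2) := by
  induction l generalizing sB sA subj obj d1 d2 with
  | nil => simp [pbLoop, pvSplit, paClassify]
  | cons kv rest ih =>
    obtain ⟨k, v⟩ := kv
    by_cases hv : v == "IN"
    · have hv' : v = "IN" := by simpa using hv
      have hnn : (v == "NN") = false := by simp [hv']
      simp [pbLoop, pvSplit, hv, hnn, pbLoop_after, paClassify]
    · by_cases hnn : v == "NN" <;> simp [pbLoop, pvSplit, paClassify, hv, hnn, ih]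


-- ===== VERDICT =====
theorem get_animation_params_spec : Claim_equal_get_animation_params := by
  intro map _ hpre
  unfold Spec_get_animation_params
  have hsplit : (pvSplit map).1 ++ (pvSplit map).2 = map := pvSplit_append map
  have hnd : (((pvSplit map).1 ++ (pvSplit map).2).map Prod.fst).Nodup := by rw [hsplit]; exact hpre
  have hnd' := hnd
  rw [List.map_append, List.nodup_append] at hnd'
  simp only [get_animation_params, get_animation_params_alt, paKeys_eq]
  rw [show PySem.Dict.mk map = PySem.Dict.mk ((pvSplit map).1 ++ (pvSplit map).2) from by rw [hsplit]]
  rw [paPop_eq _ _ _ hnd]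
  rw [pbLoop_before]
  simp only [pa_items _ hnd'.1, paCopy_items _ hnd'.2.1]
  by_cases hp : (pvSplit map).1.isEmpty <;> by_cases hs : (pvSplit map).2.isEmpty <;>
    simp [hp, hs]
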